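-- pv_equiv track=rewrite | github.com/Codefident/wdi_zadania | cw4/z03.py | hasEvenDigit
-- ===== SOURCE A (Python) =====
-- def hasEvenDigit(n):
--     if n == 0:
--         return True
--     while n > 0:
--         if (n % 10) % 2 == 0:
--             return True
--         n //= 10
--     return False
-- ===== SOURCE B (Python) =====
-- def hasEvenDigit(n):
--     if n < 0:
--         return False
--     return any(c in '02468' for c in str(n))
-- ===== Notes on version B (the rewrite author's own statement) =====
-- stated objective: idiomatic
-- what changed: B scans the characters of the decimal string representation for a member of '02468' (any + generator) instead of peeling digits with an arithmetic %/// loop; negatives return False immediately as in A, and zero needs no special case since its string representation is an even digit.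
import Mathlib
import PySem

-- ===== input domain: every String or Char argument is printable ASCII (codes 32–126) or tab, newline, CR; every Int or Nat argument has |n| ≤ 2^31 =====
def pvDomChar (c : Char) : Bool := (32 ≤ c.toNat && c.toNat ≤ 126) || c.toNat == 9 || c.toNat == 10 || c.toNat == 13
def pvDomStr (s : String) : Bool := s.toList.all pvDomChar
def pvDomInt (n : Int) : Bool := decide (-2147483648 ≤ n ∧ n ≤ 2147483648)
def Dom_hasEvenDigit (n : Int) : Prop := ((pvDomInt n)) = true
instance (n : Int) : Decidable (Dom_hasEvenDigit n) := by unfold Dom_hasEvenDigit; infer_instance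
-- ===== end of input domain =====

-- B replaces A's arithmetic digit-peeling loop by a scan of the decimal string
-- representation for a character of '02468' (idiomatic; same cost).

-- ===== PORT A =====
-- the 'while n > 0: …; n //= 10' loop of A, as structural recursion on n
def hasEvenDigitLoop (n : Int) : Bool :=
  if h : n > 0 then
    if PySem.Int.mod (PySem.Int.mod n 10) 2 == 0 then true
    else hasEvenDigitLoop (PySem.Int.floordiv n 10)
  else false
termination_by n.toNat
decreasing_by
  simp only [PySem.Int.floordiv]
  rw [Int.fdiv_eq_ediv]
  simp
  omega

def hasEvenDigit (n : Int) : Bool :=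
  if n == 0 then true
  else hasEvenDigitLoop n

-- ===== PORT B =====
def hasEvenDigit_alt (n : Int) : Bool :=
  if n < 0 then false
  else (PySem.Int.toStr n).toList.any (fun c => ("02468".toList).contains c)

-- ===== PRECONDITION & SPEC =====
def Spec_hasEvenDigit (n : Int) (out : Bool) : Prop := out = hasEvenDigit_alt n
instance (n : Int) (out : Bool) : Decidable (Spec_hasEvenDigit n out) := by unfold Spec_hasEvenDigit; infer_instance

-- ===== CLAIM (what is proved, stated in full; the proofs are below) =====
def Claim_equal_hasEvenDigit : Prop := ∀ (n : Int), Dom_hasEvenDigit n → Spec_hasEvenDigit n (hasEvenDigit n)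

-- ===== LEMMAS AND PROOFS =====

-- a decimal digit's character is in '02468' iff the digit is even
lemma digitChar_even (d : Nat) (hd : d < 10) :
    (Nat.digitChar d = '0' ∨ Nat.digitChar d = '2' ∨ Nat.digitChar d = '4' ∨
      Nat.digitChar d = '6' ∨ Nat.digitChar d = '8') ↔ d % 2 = 0 := by
  interval_cases d <;> simp <;> decide

-- A's loop on a positive natural computes "some digit of m is even"
lemma loop_eq_any (m : Nat) (hm : 0 < m) :
    hasEvenDigitLoop (m : Int) =
      (Nat.toDigits 10 m).any (fun c => ("02468".toList).contains c) := by
  induction m using Nat.strong_induction_on with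
  | _ m ih =>
    rw [hasEvenDigitLoop.eq_def]
    have hpos : (m : Int) > 0 := by exact_mod_cast hm
    rw [dif_pos hpos]
    have hmod : PySem.Int.mod (PySem.Int.mod (m : Int) 10) 2 = ((m % 10 % 2 : Nat) : Int) := by
      simp [PySem.Int.mod, Int.fmod_eq_emod, Int.emod_emod_of_dvd]
    have hdiv : PySem.Int.floordiv (m : Int) 10 = ((m / 10 : Nat) : Int) := by
      simp [PySem.Int.floordiv, Int.fdiv_eq_ediv]
    by_cases hlt : m < 10
    · rw [Nat.toDigits_of_lt_base hlt]
      have h10 : m % 10 = m := Nat.mod_eq_of_lt hlt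
      rw [hmod, hdiv]
      by_cases hev : m % 2 = 0
      · simp [h10, hev, List.any]
        exact (digitChar_even m hlt).mpr hev
      · have : ¬ ((((m % 10 % 2 : Nat) : Int)) == 0) = true := by
          simp [h10]; omega
        rw [if_neg this]
        have : m / 10 = 0 := Nat.div_eq_of_lt hlt
        rw [this]
        rw [hasEvenDigitLoop.eq_def]
        simp [List.any]
        have hne2 := (digitChar_even m hlt).not.mpr (by omega)
        tauto
    · push_neg at hlt
      rw [Nat.toDigits_of_base_le (by norm_num) hlt]
      have hq : 0 < m / 10 := Nat.div_pos hlt (by norm_num)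
      have hrec := ih (m / 10) (Nat.div_lt_self hm (by norm_num)) hq
      rw [hmod, hdiv, List.any_append]
      by_cases hev : m % 10 % 2 = 0
      · simp [hev, List.any]
        exact Or.inr ((digitChar_even (m % 10) (Nat.mod_lt _ (by norm_num))).mpr hev)
      · have hne : ¬ ((((m % 10 % 2 : Nat) : Int)) == 0) = true := by
          simp; omega
        rw [if_neg hne, hrec]
        simp [List.any]
        intro h
        exact absurd ((digitChar_even (m % 10) (Nat.mod_lt _ (by norm_num))).mp h) hev

-- ===== VERDICT (by name: the statement is the Claim_ definition above) =====
theorem hasEvenDigit_spec : Claim_equal_hasEvenDigit := by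
  intro n _
  unfold Spec_hasEvenDigit hasEvenDigit hasEvenDigit_alt
  by_cases h0 : n = 0
  · subst h0
    simp [PySem.Int.toStr, PySem.Int.toChars, Nat.toDigits_zero]
  · rw [if_neg (by simpa using h0)]
    by_cases hneg : n < 0
    · rw [if_pos hneg, hasEvenDigitLoop]
      rw [dif_neg (by omega)]
    · rw [if_neg hneg]
      push_neg at hneg
      have hpos : 0 < n := lt_of_le_of_ne hneg (Ne.symm h0)
      obtain ⟨m, rfl⟩ : ∃ m : Nat, n = (m : Int) := ⟨n.toNat, by omega⟩
      have hm : 0 < m := by exact_mod_cast hpos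
      rw [loop_eq_any m hm]
      have h1 : ¬ ((m : Int) < 0) := Int.not_lt.mpr (Int.natCast_nonneg m)
      simp [PySem.Int.toStr, PySem.Int.toChars, h1, Int.toNat_natCast]
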